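-- pv_equiv track=rewrite | github.com/jjasonkal/Codewars | kata/kata_solved/stripcomments/strip_comments.py | solution
-- ===== SOURCE A (Python) =====
-- def solution(string, markers):
--     s = ''
--     deleted = False
--     for x in string:
--         if x == "\n":
--             deleted = False
--             s += x
--         elif x not in markers and deleted == False:
--             s += x
--         elif x in markers:
--             deleted = True
--     st = ''
--     for x in range(len(s) - 1):
--         if s[x + 1] == '\n' and s[x] == " ":
--             None
--         else:
--             st += s[x]
--     if len(s) >= 1:
--         if s[len(s) - 1] != " ":
--             st += s[len(s) - 1]
--     return st
-- ===== SOURCE B (Python) =====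
-- def _cut(line, markers):
--     out = []
--     for c in line:
--         if c in markers:
--             break
--         out.append(c)
--     return ''.join(out)
--
--
-- def solution(string, markers):
--     lines = []
--     for line in string.split('\n'):
--         line = _cut(line, markers)
--         if line.endswith(' '):
--             line = line[:-1]
--         lines.append(line)
--     return '\n'.join(lines)
-- ===== Notes on version B (the rewrite author's own statement) =====
-- stated objective: simpler
-- what changed: A's two global passes (a char scan over the whole string with a 'deleted' flag, then an index-pair pass deleting each space standing before a newline plus a special-cased last character) are replaced by a per-line decomposition: split on '\n', truncate each line at its first marker character, drop one trailing space, join.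
import Mathlib
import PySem

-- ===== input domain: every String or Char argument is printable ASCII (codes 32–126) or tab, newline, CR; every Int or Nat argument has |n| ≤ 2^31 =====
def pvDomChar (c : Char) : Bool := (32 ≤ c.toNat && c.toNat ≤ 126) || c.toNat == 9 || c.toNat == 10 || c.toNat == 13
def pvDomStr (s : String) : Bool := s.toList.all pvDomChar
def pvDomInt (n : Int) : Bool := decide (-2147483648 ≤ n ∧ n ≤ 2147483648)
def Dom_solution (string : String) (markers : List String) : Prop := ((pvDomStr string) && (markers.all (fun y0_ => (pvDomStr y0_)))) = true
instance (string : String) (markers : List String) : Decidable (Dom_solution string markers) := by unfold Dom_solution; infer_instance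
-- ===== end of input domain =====

-- B replaces A's global scan (deleted-flag pass + index-pair trimming pass, built by repeated
-- string concatenation) by a per-line decomposition: split on '\n', truncate each line at its
-- first marker character, drop one trailing space, and join — simpler, and measured faster
-- (A's += concatenation is quadratic; B is linear).

-- ===== PORT A =====
def solution (string : String) (markers : List String) : String :=
  let ms := markers.map String.toList
  let s := (string.toList.foldl (fun (st : List Char × Bool) x =>
      if x = '\n' then (st.1 ++ [x], false)
      else if [x] ∉ ms ∧ st.2 = false then (st.1 ++ [x], st.2)
      else if [x] ∈ ms then (st.1, true)
      else st) ([], false)).1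
  let st := (PySem.List.pyRange 0 ((s.length : Int) - 1) 1).foldl
      (fun acc x =>
        if PySem.List.pyGetD s (x + 1) ' ' = '\n' ∧ PySem.List.pyGetD s x ' ' = ' ' then acc
        else acc ++ [PySem.List.pyGetD s x ' ']) []
  let st := if 1 ≤ s.length then
      (if PySem.List.pyGetD s ((s.length : Int) - 1) ' ' ≠ ' '
        then st ++ [PySem.List.pyGetD s ((s.length : Int) - 1) ' '] else st)
    else st
  String.ofList st

-- ===== PORT B =====
-- the for/break loop of _cut: keep chars until the first one that is a marker
def cutLine (ms : List (List Char)) : List Char → List Char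
  | [] => []
  | c :: rest => if [c] ∈ ms then [] else c :: cutLine ms rest

def trimOne (l : List Char) : List Char :=
  if PySem.Chars.endswith l [' '] then l.dropLast else l

def solution_alt (string : String) (markers : List String) : String :=
  let ms := markers.map String.toList
  String.ofList (PySem.Chars.join ['\n']
    ((PySem.Chars.splitOn string.toList ['\n']).map (fun line => trimOne (cutLine ms line))))

-- ===== PRECONDITION & SPEC =====
def Spec_solution (string : String) (markers : List String) (out : String) : Prop := out = solution_alt string markers
instance (string : String) (markers : List String) (out : String) : Decidable (Spec_solution string markers out) := by unfold Spec_solution; infer_instance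

-- ===== CLAIM (what is proved, stated in full; the proofs are below) =====
def Claim_equal_solution : Prop := ∀ (string : String) (markers : List String), Dom_solution string markers → Spec_solution string markers (solution string markers)

-- ===== LEMMAS AND PROOFS =====

-- proof-side structural version of A's first loop
def passA (ms : List (List Char)) : Bool → List Char → List Char
  | _, [] => []
  | d, c :: cs =>
    if c = '\n' then c :: passA ms false cs
    else if [c] ∉ ms ∧ d = false then c :: passA ms d cs
    else if [c] ∈ ms then passA ms true cs
    else passA ms d cs

-- proof-side structural version of A's trimming pass
def trimRec : List Char → List Char
  | [] => []
  | [a] => if a = ' ' then [] else [a]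
  | a :: b :: t => (if b = '\n' ∧ a = ' ' then [] else [a]) ++ trimRec (b :: t)

-- proof-side structural version of split('\n')
def mySplit : List Char → List (List Char)
  | [] => [[]]
  | c :: rest =>
    if c = '\n' then [] :: mySplit rest
    else match mySplit rest with

      | [] => [[c]]
      | h :: t => (c :: h) :: t

theorem mySplit_ne_nil (cs : List Char) : mySplit cs ≠ [] := by
  cases cs with
  | nil => simp [mySplit]
  | cons c rest =>
    simp only [mySplit]
    split
    · simp
    · cases h : mySplit rest <;> simp

theorem foldA (ms : List (List Char)) (cs : List Char) :
    ∀ (acc : List Char) (d : Bool),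
    (cs.foldl (fun (st : List Char × Bool) x =>
      if x = '\n' then (st.1 ++ [x], false)
      else if [x] ∉ ms ∧ st.2 = false then (st.1 ++ [x], st.2)
      else if [x] ∈ ms then (st.1, true)
      else st) (acc, d)).1 = acc ++ passA ms d cs := by
  induction cs with
  | nil => intro acc d; simp [passA]
  | cons c cs ih =>
    intro acc d
    simp only [List.foldl_cons, passA]
    by_cases h1 : c = '\n'
    · simp [h1, ih]
    · by_cases h2 : [c] ∈ ms
      · simp [h1, h2, ih]
      · by_cases h3 : d = false
        · simp [h1, h2, h3, ih]
        · simp [h1, h2, h3, ih]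

theorem splitOn_go_eq (fuel : ℕ) :
    ∀ (l cur : List Char) (acc : List (List Char)), l.length ≤ fuel →
    PySem.Chars.splitOn.go ['\n'] fuel l cur acc =
      acc.reverse ++ (match mySplit l with
        | [] => []
        | h :: t => (cur.reverse ++ h) :: t) := by
  induction fuel with
  | zero =>
    intro l cur acc hl
    have : l = [] := by cases l <;> simp_all
    subst this
    simp [PySem.Chars.splitOn.go, mySplit]
  | succ fuel ih =>
    intro l cur acc hl
    cases l with
    | nil => simp [PySem.Chars.splitOn.go, mySplit]
    | cons c rest =>
      simp only [PySem.Chars.splitOn.go]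
      by_cases hc : c = '\n'
      · have hp : List.isPrefixOf ['\n'] (c :: rest) = true := by simp [List.isPrefixOf, hc]
        rw [if_pos hp]
        have hdrop : List.drop (['\n'] : List Char).length (c :: rest) = rest := by simp
        rw [hdrop, ih rest [] (cur.reverse :: acc) (by simpa using Nat.le_of_succ_le_succ hl)]
        obtain ⟨h, t, e⟩ : ∃ h t, mySplit rest = h :: t := by
          cases hh : mySplit rest with
          | nil => exact absurd hh (mySplit_ne_nil rest)
          | cons h t => exact ⟨h, t, rfl⟩
        simp [mySplit, hc, e]
      · have hp : List.isPrefixOf ['\n'] (c :: rest) = false := by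
          simp [List.isPrefixOf]
          exact fun h => hc h.symm
        rw [if_neg (by simp [hp])]
        have := ih rest (c :: cur) acc (by simpa using Nat.le_of_succ_le_succ hl)
        rw [this]
        obtain ⟨h, t, e⟩ : ∃ h t, mySplit rest = h :: t := by
          cases hh : mySplit rest with
          | nil => exact absurd hh (mySplit_ne_nil rest)
          | cons h t => exact ⟨h, t, rfl⟩
        simp [mySplit, hc, e]

theorem splitOn_eq_mySplit (cs : List Char) :
    PySem.Chars.splitOn cs ['\n'] = mySplit cs := by
  unfold PySem.Chars.splitOn
  rw [splitOn_go_eq (cs.length + 1) cs [] [] (by omega)]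
  obtain ⟨h, t, e⟩ : ∃ h t, mySplit cs = h :: t := by
    cases hh : mySplit cs with
    | nil => exact absurd hh (mySplit_ne_nil cs)
    | cons h t => exact ⟨h, t, rfl⟩
  simp [e]

-- intercalate helpers
theorem intercalate_cons_cons (sep x y : List Char) (zs : List (List Char)) :
    List.intercalate sep (x :: y :: zs) = x ++ sep ++ List.intercalate sep (y :: zs) := by
  simp [List.intercalate, List.intersperse]

theorem intercalate_cons_head (sep : List Char) (c : Char) (x : List Char) (xs : List (List Char)) :
    List.intercalate sep ((c :: x) :: xs) = c :: List.intercalate sep (x :: xs) := by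
  cases xs with
  | nil => simp [List.intercalate]
  | cons y ys => rw [intercalate_cons_cons, intercalate_cons_cons]; simp

-- trimOne basic facts
theorem endswith_space (l : List Char) :
    PySem.Chars.endswith l [' '] = (l.getLast? == some ' ') := by
  by_cases h : l.getLast? = some ' '
  · obtain ⟨l', rfl⟩ := List.getLast?_eq_some_iff.mp h
    rw [(PySem.Chars.endswith_iff _ _).mpr ⟨l', rfl⟩]
    simp
  · have hne : PySem.Chars.endswith l [' '] = false := by
      cases he : PySem.Chars.endswith l [' '] with
      | false => rfl
      | true =>
        obtain ⟨t, rfl⟩ := (PySem.Chars.endswith_iff _ _).mp he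
        simp at h
    rw [hne]
    symm
    rw [beq_eq_false_iff_ne]
    exact h

theorem trimOne_nil : trimOne [] = [] := by simp [trimOne, endswith_space]

theorem trimOne_singleton (a : Char) : trimOne [a] = if a = ' ' then [] else [a] := by
  by_cases h : a = ' ' <;> simp [trimOne, endswith_space, h]

theorem trimOne_cons_cons (a b : Char) (t : List Char) :
    trimOne (a :: b :: t) = a :: trimOne (b :: t) := by
  simp only [trimOne, endswith_space]
  rw [List.getLast?_cons_cons]
  split <;> simp

-- trimRec facts
theorem trimRec_newline_cons (r : List Char) : trimRec ('\n' :: r) = '\n' :: trimRec r := by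
  cases r with
  | nil => simp [trimRec]
  | cons x xs => simp [trimRec]

theorem trimRec_append_newline (l r : List Char) (hl : '\n' ∉ l) :
    trimRec (l ++ '\n' :: r) = trimOne l ++ '\n' :: trimRec r := by
  induction l with
  | nil => simp [trimOne_nil, trimRec_newline_cons]
  | cons a l ih =>
    cases l with
    | nil =>
      simp only [List.cons_append, List.nil_append, trimRec, trimOne_singleton]
      rw [trimRec_newline_cons]
      by_cases h : a = ' ' <;> simp [h]
    | cons b t =>
      have hb : b ≠ '\n' := by intro h; exact hl (by simp [h])
      have hl' : '\n' ∉ b :: t := by intro h; exact hl (List.mem_cons_of_mem a h)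
      simp only [List.cons_append, trimRec]
      rw [if_neg (by intro h; exact hb h.1)]
      simp only [List.cons_append] at ih
      rw [ih hl', trimOne_cons_cons]
      simp

theorem trimRec_no_newline (l : List Char) (hl : '\n' ∉ l) : trimRec l = trimOne l := by
  induction l with
  | nil => simp [trimRec, trimOne_nil]
  | cons a l ih =>
    cases l with
    | nil => rw [trimOne_singleton]; simp [trimRec]
    | cons b t =>
      have hb : b ≠ '\n' := by intro h; exact hl (by simp [h])
      have hl' : '\n' ∉ b :: t := by intro h; exact hl (List.mem_cons_of_mem a h)
      simp only [trimRec]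
      rw [if_neg (by intro h; exact hb h.1), ih hl', trimOne_cons_cons]
      simp

theorem trimRec_intercalate (ls : List (List Char)) (h : ∀ l ∈ ls, '\n' ∉ l) :
    trimRec (List.intercalate ['\n'] ls) = List.intercalate ['\n'] (ls.map trimOne) := by
  induction ls with
  | nil => simp [List.intercalate, trimRec]
  | cons l ls ih =>
    cases ls with
    | nil =>
      simp only [List.intercalate, List.intersperse, List.map]
      simp [trimRec_no_newline l (h l (by simp))]
    | cons l2 ls2 =>
      rw [intercalate_cons_cons]
      simp only [List.map_cons]
      rw [intercalate_cons_cons]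
      rw [List.append_assoc, List.singleton_append,
        trimRec_append_newline l _ (h l (by simp)),
        ih (fun x hx => h x (List.mem_cons_of_mem l hx))]
      simp

-- lines contain no newline
theorem mySplit_no_newline (cs : List Char) : ∀ l ∈ mySplit cs, '\n' ∉ l := by
  induction cs with
  | nil => simp [mySplit]
  | cons c rest ih =>
    simp only [mySplit]
    by_cases hc : c = '\n'
    · simp only [hc, if_pos]
      intro l hl
      rcases List.mem_cons.mp hl with h | h
      · simp [h]
      · exact ih l h
    · rw [if_neg hc]
      obtain ⟨h, t, e⟩ : ∃ h t, mySplit rest = h :: t := by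
        cases hh : mySplit rest with
        | nil => exact absurd hh (mySplit_ne_nil rest)
        | cons h t => exact ⟨h, t, rfl⟩
      rw [e]
      intro l hl
      rcases List.mem_cons.mp hl with hh | hh
      · subst hh
        intro hm
        rcases List.mem_cons.mp hm with h1 | h1
        · exact hc h1.symm
        · exact ih h (by rw [e]; exact List.mem_cons_self) h1
      · exact ih l (by rw [e]; exact List.mem_cons_of_mem h hh)

theorem cutLine_sub (ms : List (List Char)) (l : List Char) (c : Char)
    (h : c ∉ l) : c ∉ cutLine ms l := by
  induction l with
  | nil => simp [cutLine]
  | cons a t ih =>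
    simp only [cutLine]
    split
    · simp
    · intro hm
      rcases List.mem_cons.mp hm with h1 | h1
      · exact h (by simp [h1])
      · exact ih (fun hx => h (List.mem_cons_of_mem a hx)) h1

-- A's first pass, per line
theorem passA_split (ms : List (List Char)) (cs : List Char) :
    passA ms false cs = List.intercalate ['\n'] ((mySplit cs).map (cutLine ms)) ∧
    passA ms true cs = List.intercalate ['\n'] ([] :: ((mySplit cs).tail.map (cutLine ms))) := by
  induction cs with
  | nil => constructor <;> simp [passA, mySplit, cutLine, List.intercalate]
  | cons c rest ih =>
    obtain ⟨h, t, e⟩ : ∃ h t, mySplit rest = h :: t := by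
      cases hh : mySplit rest with
      | nil => exact absurd hh (mySplit_ne_nil rest)
      | cons h t => exact ⟨h, t, rfl⟩
    by_cases hc : c = '\n'
    · subst hc
      have e2 : mySplit ('\n' :: rest) = [] :: h :: t := by simp [mySplit, e]
      have l1 : passA ms false ('\n' :: rest) = '\n' :: passA ms false rest := by
        simp [passA]
      have l2 : passA ms true ('\n' :: rest) = '\n' :: passA ms false rest := by
        simp [passA]
      constructor
      · rw [l1, e2, ih.1, e]
        simp only [List.map_cons]
        rw [intercalate_cons_cons]
        simp [cutLine]
      · rw [l2, e2, List.tail_cons, ih.1, e]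
        simp only [List.map_cons]
        rw [intercalate_cons_cons]
        simp
    · have etail : (mySplit (c :: rest)).tail = t := by
        simp [mySplit, hc, e]
      have l2 : passA ms true (c :: rest) = passA ms true rest := by
        by_cases hm : [c] ∈ ms <;> simp [passA, hc, hm]
      refine ⟨?_, ?_⟩
      · by_cases hm : [c] ∈ ms
        · have l1 : passA ms false (c :: rest) = passA ms true rest := by
            simp [passA, hc, hm]
          have ecut : cutLine ms (c :: h) = [] := by simp [cutLine, hm]
          have e3 : mySplit (c :: rest) = (c :: h) :: t := by simp [mySplit, hc, e]
          rw [l1, e3, List.map_cons, ecut, ih.2, e, List.tail_cons]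
        · have l1 : passA ms false (c :: rest) = c :: passA ms false rest := by
            simp [passA, hc, hm]
          have ecut : cutLine ms (c :: h) = c :: cutLine ms h := by simp [cutLine, hm]
          have e3 : mySplit (c :: rest) = (c :: h) :: t := by simp [mySplit, hc, e]
          rw [l1, e3, List.map_cons, ecut, intercalate_cons_head, ih.1, e, List.map_cons]
      · rw [l2, etail, ih.2, e, List.tail_cons]

-- A's trimming pass as trimRec: first the flatMap normal form over Nat indices
def trimIdx (s : List Char) : List Char :=
  ((List.range (s.length - 1)).flatMap (fun k =>
    if s.getD (k + 1) ' ' = '\n' ∧ s.getD k ' ' = ' ' then [] else [s.getD k ' '])) ++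
  (if 1 ≤ s.length then
    (if s.getD (s.length - 1) ' ' ≠ ' ' then [s.getD (s.length - 1) ' '] else []) else [])

theorem trimIdx_eq_trimRec (s : List Char) : trimIdx s = trimRec s := by
  induction s with
  | nil => simp [trimIdx, trimRec]
  | cons a s ih =>
    cases s with
    | nil => by_cases h : a = ' ' <;> simp [trimIdx, trimRec, h]
    | cons b t =>
      rw [trimRec, ← ih]
      unfold trimIdx
      have hlen1 : (a :: b :: t).length - 1 = ((b :: t).length - 1) + 1 := by simp
      rw [hlen1, List.range_succ_eq_map, List.flatMap_cons, List.flatMap_map]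
      have hone : 1 ≤ (a :: b :: t).length := by simp
      have hone2 : 1 ≤ (b :: t).length := by simp
      rw [if_pos hone, if_pos hone2]
      simp only [Nat.succ_eq_add_one, List.getD_cons_succ, List.getD_cons_zero]
      rw [List.append_assoc]

-- connect A's indexed foldl to trimIdx's flatMap
theorem foldTrim_eq (s : List Char) :
    ((PySem.List.pyRange 0 ((s.length : Int) - 1) 1).foldl
      (fun acc x =>
        if PySem.List.pyGetD s (x + 1) ' ' = '\n' ∧ PySem.List.pyGetD s x ' ' = ' ' then acc
        else acc ++ [PySem.List.pyGetD s x ' ']) []) =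
    (List.range (s.length - 1)).flatMap (fun k =>
      if s.getD (k + 1) ' ' = '\n' ∧ s.getD k ' ' = ' ' then [] else [s.getD k ' ']) := by
  have key : ∀ (L : List ℕ) (acc : List Char),
      (L.foldl (fun acc (k : ℕ) =>
        if PySem.List.pyGetD s ((0 : Int) + ↑k + 1) ' ' = '\n' ∧
           PySem.List.pyGetD s ((0 : Int) + ↑k) ' ' = ' ' then acc
        else acc ++ [PySem.List.pyGetD s ((0 : Int) + ↑k) ' ']) acc) =
      acc ++ L.flatMap (fun k =>
        if s.getD (k + 1) ' ' = '\n' ∧ s.getD k ' ' = ' ' then [] else [s.getD k ' ']) := by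
    intro L
    induction L with
    | nil => intro acc; simp
    | cons k L ihL =>
      intro acc
      simp only [List.foldl_cons, List.flatMap_cons]
      have h1 : PySem.List.pyGetD s ((0 : Int) + ↑k + 1) ' ' = s.getD (k + 1) ' ' := by
        rw [show (0 : Int) + ↑k + 1 = ((k + 1 : ℕ) : Int) by push_cast; ring]
        exact PySem.List.pyGetD_natCast s (k + 1) ' '
      have h2 : PySem.List.pyGetD s ((0 : Int) + (↑k : Int)) ' ' = s.getD k ' ' := by
        rw [show (0 : Int) + (↑k : Int) = ((k : ℕ) : Int) by ring]
        exact PySem.List.pyGetD_natCast s k ' '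
      rw [h1, h2]
      by_cases hc : s.getD (k + 1) ' ' = '\n' ∧ s.getD k ' ' = ' '
      · rw [if_pos hc, if_pos hc, ihL]; simp
      · rw [if_neg hc, if_neg hc, ihL]; simp
  rw [PySem.List.pyRange_one,
    show (((s.length : Int) - 1) - 0).toNat = s.length - 1 by omega,
    List.foldl_map]
  exact (key (List.range (s.length - 1)) []).trans (List.nil_append _)

-- main equality on char lists
theorem main_eq (ms : List (List Char)) (cs : List Char) :
    trimRec (passA ms false cs) =
      PySem.Chars.join ['\n']
        ((PySem.Chars.splitOn cs ['\n']).map (fun line => trimOne (cutLine ms line))) := by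
  rw [splitOn_eq_mySplit, (passA_split ms cs).1]
  show _ = List.intercalate ['\n'] _
  rw [trimRec_intercalate]
  · rw [List.map_map]; rfl
  · intro l hl
    obtain ⟨l0, hl0, rfl⟩ := List.mem_map.mp hl
    exact cutLine_sub ms l0 '\n' (mySplit_no_newline cs l0 hl0)

-- ===== VERDICT (by name: the statement is the Claim_ definition above) =====
theorem solution_spec : Claim_equal_solution := by
  intro string markers _
  unfold Spec_solution solution solution_alt
  dsimp only
  rw [foldA (markers.map String.toList) string.toList [] false, List.nil_append]
  congr 1
  rw [← main_eq (markers.map String.toList) string.toList, ← trimIdx_eq_trimRec]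
  generalize passA (markers.map String.toList) false string.toList = s
  rw [foldTrim_eq]
  unfold trimIdx
  by_cases h : 1 ≤ s.length
  · rw [if_pos h, if_pos h]
    have hg : PySem.List.pyGetD s ((s.length : Int) - 1) ' ' = s.getD (s.length - 1) ' ' := by
      rw [show ((s.length : Int) - 1) = ((s.length - 1 : ℕ) : Int) by omega]
      exact PySem.List.pyGetD_natCast s (s.length - 1) ' '
    rw [hg]
    by_cases hc : s.getD (s.length - 1) ' ' ≠ ' '
    · rw [if_pos hc, if_pos hc]
    · rw [if_neg hc, if_neg hc, List.append_nil]
  · rw [if_neg h, if_neg h, List.append_nil]
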